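-- pv_equiv track=rewrite | github.com/dwilliams27/psp-autodecomp | tools/ab_promote.py | _diff_promotes_address_to_matched
-- ===== SOURCE A (Python) =====
-- from typing import Dict, List, Optional, Tuple
--
-- def _diff_promotes_address_to_matched(diff: str, address: str) -> bool:
--     """Per-hunk analysis: a hunk that mentions our address (in any
--     form, context or added) AND has an added `match_status: matched`
--     line counts as promoting that address. Address itself is a
--     context line in the JSON pretty-print (added/removed for
--     deletions only); using "any line" + "added matched" is the
--     accurate signal.
--
--     Conservative on multi-address commits: we still partition by
--     `@@` hunk header so a hunk for address A doesn't claim it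
--     promoted address B.
--     """
--     addr_pat = f'"address": "{address}"'
--     matched_pat = '"match_status": "matched"'
--     hunks: List[List[str]] = []
--     current: Optional[List[str]] = None
--     for line in diff.splitlines():
--         if line.startswith("@@"):
--             if current is not None:
--                 hunks.append(current)
--             current = [line]
--         elif current is not None:
--             current.append(line)
--     if current is not None:
--         hunks.append(current)
--     for hunk in hunks:
--         body = "\n".join(hunk)
--         if addr_pat not in body:
--             continue
--         if any(l.startswith("+") and matched_pat in l for l in hunk):
--             return True
--     return False
-- ===== SOURCE B (Python) =====
-- def _diff_promotes_address_to_matched(diff: str, address: str) -> bool: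
--     """Single pass over the diff: track the current hunk's state in two
--     booleans instead of materialising a list of hunks and re-joining them."""
--     addr_pat = f'"address": "{address}"'
--     matched_pat = '"match_status": "matched"'
--     in_hunk = False
--     has_addr = False
--     has_matched = False
--     for line in diff.splitlines():
--         if line.startswith("@@"):
--             if in_hunk and has_addr and has_matched:
--                 return True
--             in_hunk = True
--             has_addr = addr_pat in line
--             has_matched = False
--         elif in_hunk:
--             if addr_pat in line:
--                 has_addr = True
--             if line.startswith("+") and matched_pat in line:
--                 has_matched = True
--     return in_hunk and has_addr and has_matched
-- ===== Notes on version B (the rewrite author's own statement) =====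
-- stated objective: simpler
-- what changed: Replaced A's two-phase design (partition the diff into a list of hunks, then re-join each hunk with '\n' and substring-scan the joined body) by a single streaming pass over the lines that tracks the open hunk with two booleans (has_addr, has_matched), finalized at each '@@' header and at end of input.
-- outside the precondition, e.g. on _diff_promotes_address_to_matched('@@ h\n"address": "x\ny"\n+ "match_status": "matched"', 'x\ny'): A returns True, B returns False
import Mathlib
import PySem

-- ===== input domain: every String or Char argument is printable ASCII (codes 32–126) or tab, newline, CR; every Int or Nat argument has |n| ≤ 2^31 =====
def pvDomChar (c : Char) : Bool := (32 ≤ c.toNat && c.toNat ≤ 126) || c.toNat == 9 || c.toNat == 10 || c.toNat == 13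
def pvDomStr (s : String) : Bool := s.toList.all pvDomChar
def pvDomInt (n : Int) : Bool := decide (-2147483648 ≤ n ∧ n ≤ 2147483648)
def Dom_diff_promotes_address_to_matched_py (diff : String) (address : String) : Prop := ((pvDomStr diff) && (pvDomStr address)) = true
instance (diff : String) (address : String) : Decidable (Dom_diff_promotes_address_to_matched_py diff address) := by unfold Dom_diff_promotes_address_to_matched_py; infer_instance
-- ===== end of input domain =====

-- B replaces A's two phases (partition the diff into a list of hunks, then re-join and scan
-- each hunk) by ONE streaming pass over the lines that tracks the open hunk in two booleans.

-- ===== PORT A =====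
-- the first for-loop of A: partition the split lines into hunks (state: current, hunks)
def pvA_split : List String → Option (List String) → List (List String) → List (List String)
  | [], cur, acc =>
    match cur with
    | none => acc
    | some c => acc ++ [c]
  | l :: rest, cur, acc =>
    if PySem.Str.startswith l "@@" then
      match cur with
      | none => pvA_split rest (some [l]) acc
      | some c => pvA_split rest (some [l]) (acc ++ [c])
    else
      match cur with
      | none => pvA_split rest none acc
      | some c => pvA_split rest (some (c ++ [l])) acc

-- the second for-loop of A: scan the hunks, with `continue` and early `return True`
def pvA_scan (addr_pat matched_pat : String) : List (List String) → Bool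
  | [] => false
  | hunk :: rest =>
    let body := PySem.Str.join "\n" hunk
    if !(PySem.Str.isIn addr_pat body) then pvA_scan addr_pat matched_pat rest
    else if hunk.any (fun l => PySem.Str.startswith l "+" && PySem.Str.isIn matched_pat l) then
      true
    else pvA_scan addr_pat matched_pat rest

def diff_promotes_address_to_matched_py (diff : String) (address : String) : Bool :=
  let addr_pat := "\"address\": \"" ++ address ++ "\""
  let matched_pat := "\"match_status\": \"matched\""
  pvA_scan addr_pat matched_pat (pvA_split (PySem.Str.splitlines diff) none [])

-- ===== PORT B =====
-- B's single pass: state (in_hunk, has_addr, has_matched), early return at a header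
def pvB_loop (addr_pat matched_pat : String) : List String → Bool → Bool → Bool → Bool
  | [], inH, hA, hM => inH && hA && hM
  | l :: rest, inH, hA, hM =>
    if PySem.Str.startswith l "@@" then
      if inH && hA && hM then true
      else pvB_loop addr_pat matched_pat rest true (PySem.Str.isIn addr_pat l) false
    else if inH then
      pvB_loop addr_pat matched_pat rest inH (hA || PySem.Str.isIn addr_pat l)
        (hM || (PySem.Str.startswith l "+" && PySem.Str.isIn matched_pat l))
    else pvB_loop addr_pat matched_pat rest inH hA hM

def diff_promotes_address_to_matched_py_alt (diff : String) (address : String) : Bool :=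
  let addr_pat := "\"address\": \"" ++ address ++ "\""
  let matched_pat := "\"match_status\": \"matched\""
  pvB_loop addr_pat matched_pat (PySem.Str.splitlines diff) false false false

-- ===== PRECONDITION & SPEC =====
-- Pre_ excludes addresses containing a newline (malformed for this task — addresses are
-- plain identifier strings): there A's substring test against the '\n'-joined hunk body can
-- match across a line boundary, an artefact of the join that B's per-line pass does not share.
def Pre_diff_promotes_address_to_matched_py (diff : String) (address : String) : Prop :=
  '\n' ∉ address.toList
instance (diff : String) (address : String) : Decidable (Pre_diff_promotes_address_to_matched_py diff address) := by unfold Pre_diff_promotes_address_to_matched_py; infer_instance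
def pvWitness_diff_promotes_address_to_matched_py : String × String := ("@@ -1 +1 @@\n\"address\": \"ab\"\n+\"match_status\": \"matched\"", "ab")

def Spec_diff_promotes_address_to_matched_py (diff : String) (address : String) (out : Bool) : Prop := out = diff_promotes_address_to_matched_py_alt diff address
instance (diff : String) (address : String) (out : Bool) : Decidable (Spec_diff_promotes_address_to_matched_py diff address out) := by unfold Spec_diff_promotes_address_to_matched_py; infer_instance

-- ===== CLAIM (what is proved, stated in full; the proofs are below) =====
def Claim_equal_diff_promotes_address_to_matched_py : Prop := ∀ (diff : String) (address : String), Dom_diff_promotes_address_to_matched_py diff address → Pre_diff_promotes_address_to_matched_py diff address → Spec_diff_promotes_address_to_matched_py diff address (diff_promotes_address_to_matched_py diff address)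

-- ===== LEMMAS AND PROOFS =====

-- a prefix of a ++ c :: b that does not contain c is a prefix of a
theorem pv_prefix_mid {a b sub : List Char} {c : Char}
    (h : sub <+: a ++ c :: b) (hc : c ∉ sub) : sub <+: a := by
  by_cases hlen : sub.length ≤ a.length
  · obtain ⟨t, ht⟩ := h
    refine ⟨a.drop sub.length, ?_⟩
    have := congrArg (List.take sub.length) ht.symm
    simp [List.take_append_of_le_length hlen, List.take_left'] at this
    have hlen' : (List.take sub.length a).length = sub.length := by simp [hlen]
    rw [← this, hlen', List.take_append_drop]
  · exfalso
    apply hc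
    have hlt : a.length < sub.length := by omega
    have hget : sub[a.length] = (a ++ c :: b)[a.length]'(by simp) := h.getElem hlt
    have : (a ++ c :: b)[a.length]'(by simp) = c := by
      simp
    rw [this] at hget
    exact hget ▸ List.getElem_mem hlt

-- an infix of a ++ c :: b that does not contain c is an infix of a or of b
theorem pv_infix_mid (a : List Char) : ∀ {b sub : List Char} {c : Char},
    sub <:+: a ++ c :: b → c ∉ sub → sub <:+: a ∨ sub <:+: b := by
  induction a with
  | nil =>
    intro b sub c h hc
    simp at h
    rcases List.infix_cons_iff.mp h with hp | hi
    · cases sub with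
      | nil => exact Or.inl List.nil_infix
      | cons x s =>
        rw [List.cons_prefix_cons] at hp
        exact absurd (hp.1 ▸ List.mem_cons_self) hc
    · exact Or.inr hi
  | cons a0 a' ih =>
    intro b sub c h hc
    rcases List.infix_cons_iff.mp h with hp | hi
    · cases sub with
      | nil => exact Or.inl List.nil_infix
      | cons x s =>
        rw [List.cons_prefix_cons] at hp
        have : s <+: a' := pv_prefix_mid hp.2 (fun hm => hc (List.mem_cons_of_mem _ hm))
        exact Or.inl (List.IsPrefix.isInfix (List.cons_prefix_cons.mpr ⟨hp.1, this⟩))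
    · rcases ih hi hc with h1 | h2
      · exact Or.inl (List.infix_cons h1)
      · exact Or.inr h2

-- key: substring of the '\n'-joined lines = substring of some line, when nobody contains '\n'
theorem pv_isIn_intercalate {sub : List Char} (ls : List (List Char))
    (hne : sub ≠ []) (hsub : '\n' ∉ sub) (hls : ∀ l ∈ ls, '\n' ∉ l) :
    PySem.Chars.isIn sub (List.intercalate ['\n'] ls) = ls.any (fun l => PySem.Chars.isIn sub l) := by
  induction ls with
  | nil =>
    simp [List.intercalate]
    rw [Bool.eq_false_iff]
    intro h
    rw [PySem.Chars.isIn_iff_infix] at h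
    exact hne (List.eq_nil_of_infix_nil h)
  | cons x ls ih =>
    cases ls with
    | nil => simp [List.intercalate]
    | cons y zs =>
      have hstep : List.intercalate ['\n'] (x :: y :: zs) = x ++ '\n' :: List.intercalate ['\n'] (y :: zs) := by
        simp [List.intercalate, List.intersperse]
      rw [hstep]
      have ihr := ih (fun l hl => hls l (List.mem_cons_of_mem _ hl))
      rw [List.any_cons, ← ihr]
      rcases hx : PySem.Chars.isIn sub (x ++ '\n' :: List.intercalate ['\n'] (y :: zs)) with _ | _
      · rw [PySem.Chars.isIn_eq_false_iff] at hx
        symm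
        rw [Bool.or_eq_false_iff, Bool.eq_false_iff, Bool.eq_false_iff]
        constructor
        · intro h
          rw [PySem.Chars.isIn_iff_infix] at h
          exact hx (h.trans (List.prefix_append _ _).isInfix)
        · intro h
          rw [PySem.Chars.isIn_iff_infix] at h
          exact hx (h.trans ((List.suffix_cons _ _).trans (List.suffix_append _ _)).isInfix)
      · rw [PySem.Chars.isIn_iff_infix] at hx
        symm
        rcases pv_infix_mid x hx hsub with h1 | h2
        · rw [Bool.or_eq_true]
          exact Or.inl ((PySem.Chars.isIn_iff_infix _ _).mpr h1)
        · rw [Bool.or_eq_true]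
          exact Or.inr ((PySem.Chars.isIn_iff_infix _ _).mpr h2)

-- every line produced by splitlines.go is free of break characters
theorem pv_go_lines (isB : Char → Bool) (s cur : List Char) (acc : List (List Char))
    (hcur : ∀ c ∈ cur, isB c = false)
    (hacc : ∀ l ∈ acc, ∀ c ∈ l, isB c = false) :
    ∀ l ∈ PySem.Chars.splitlines.go isB s cur acc, ∀ c ∈ l, isB c = false := by
  fun_induction PySem.Chars.splitlines.go isB s cur acc with
  | case1 cur acc h =>
    intro l hl c hc
    exact hacc l (by simpa using hl) c hc
  | case2 cur acc h =>
    intro l hl c hc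
    simp at hl
    rcases hl with hl | rfl
    · exact hacc l hl c hc
    · exact hcur c (by simpa using hc)
  | case3 rest cur acc ih =>
    refine ih (by simp) ?_
    intro l hl c hc
    simp at hl
    rcases hl with hl | hl
    · subst hl; exact hcur c (by simpa using hc)
    · exact hacc l hl c hc
  | case4 c rest cur acc hx hb ih =>
    refine ih (by simp) ?_
    intro l hl c' hc'
    simp at hl
    rcases hl with hl | hl
    · subst hl; exact hcur c' (by simpa using hc')
    · exact hacc l hl c' hc'
  | case5 c rest cur acc hx hb ih =>
    refine ih ?_ hacc
    intro c' hc'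
    rcases List.mem_cons.mp hc' with rfl | hm
    · simpa using hb
    · exact hcur c' hm

-- every line of splitlines is free of '\n'
theorem pv_splitlines_no_newline (s : String) :
    ∀ l ∈ PySem.Str.splitlines s, '\n' ∉ l.toList := by
  intro l hl
  simp only [PySem.Str.splitlines, List.mem_map] at hl
  obtain ⟨cs, hcs, rfl⟩ := hl
  intro hmem
  have := pv_go_lines _ s.toList [] [] (by simp) (by simp) cs hcs '\n' (by simpa using hmem)
  simp at this

-- a header line does not start with '+'
theorem pv_header_not_plus {l : String} (h : PySem.Str.startswith l "@@" = true) :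
    PySem.Str.startswith l "+" = false := by
  simp only [PySem.Str.startswith] at *
  rw [PySem.Chars.startswith_iff] at h
  obtain ⟨t, ht⟩ := h
  rw [Bool.eq_false_iff]
  intro hp
  rw [PySem.Chars.startswith_iff] at hp
  obtain ⟨u, hu⟩ := hp
  rw [← ht] at hu
  simp at hu

-- A's hunk test on the joined body, reduced to a per-line test
theorem pv_body_test (addr_pat : String) (hunk : List String)
    (hne : addr_pat.toList ≠ []) (hsub : '\n' ∉ addr_pat.toList)
    (hls : ∀ l ∈ hunk, '\n' ∉ l.toList) :
    PySem.Str.isIn addr_pat (PySem.Str.join "\n" hunk)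
      = hunk.any (fun l => PySem.Str.isIn addr_pat l) := by
  simp only [PySem.Str.isIn, PySem.Str.join, PySem.Chars.join, String.toList_ofList]
  have : ("\n" : String).toList = ['\n'] := by decide
  rw [this]
  rw [pv_isIn_intercalate (hunk.map String.toList) hne hsub
    (by intro l hl; simp at hl; obtain ⟨x, hx, rfl⟩ := hl; exact hls x hx)]
  rw [List.any_map]
  rfl

-- A's second loop is an `any` over the hunks
theorem pv_scan_any (addr_pat matched_pat : String) (hs : List (List String)) :
    pvA_scan addr_pat matched_pat hs
      = hs.any (fun hunk =>
          PySem.Str.isIn addr_pat (PySem.Str.join "\n" hunk)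
            && hunk.any (fun l => PySem.Str.startswith l "+" && PySem.Str.isIn matched_pat l)) := by
  induction hs with
  | nil => rfl
  | cons hunk rest ih =>
    simp only [pvA_scan, List.any_cons]
    rcases h1 : PySem.Str.isIn addr_pat (PySem.Str.join "\n" hunk) with _ | _
    · rw [ih]
      simp
    · rw [ih]
      rcases hunk.any (fun l => PySem.Str.startswith l "+" && PySem.Str.isIn matched_pat l) with _ | _ <;> simp

-- every line of every hunk built by pvA_split satisfies P, given P on the inputs
theorem pv_split_lines {P : String → Prop} : ∀ (lines : List String)
    (cur : Option (List String)) (acc : List (List String)),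
    (∀ l ∈ lines, P l) →
    (∀ c, cur = some c → ∀ l ∈ c, P l) →
    (∀ h ∈ acc, ∀ l ∈ h, P l) →
    ∀ h ∈ pvA_split lines cur acc, ∀ l ∈ h, P l := by
  intro lines
  induction lines with
  | nil =>
    intro cur acc _ hcur hacc h hh
    cases cur with
    | none => exact hacc h hh
    | some c =>
      simp only [pvA_split] at hh
      rcases List.mem_append.mp hh with hm | hm
      · exact hacc h hm
      · simp at hm; subst hm; exact hcur h rfl
  | cons l rest ih =>
    intro cur acc hlines hcur hacc
    have hl : P l := hlines l List.mem_cons_self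
    have hrest : ∀ x ∈ rest, P x := fun x hx => hlines x (List.mem_cons_of_mem _ hx)
    simp only [pvA_split]
    split
    · cases cur with
      | none =>
        exact ih _ acc hrest (by intro c hc; injection hc with hc; subst hc; intro x hx; simp at hx; subst hx; exact hl) hacc
      | some c =>
        refine ih _ (acc ++ [c]) hrest (by intro c' hc'; injection hc' with hc'; subst hc'; intro x hx; simp at hx; subst hx; exact hl) ?_
        intro h hh x hx
        rcases List.mem_append.mp hh with hm | hm
        · exact hacc h hm x hx
        · simp at hm; subst hm; exact hcur h rfl x hx
    · cases cur with
      | none => exact ih _ acc hrest (by rintro c h; cases h) hacc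
      | some c =>
        refine ih _ acc hrest ?_ hacc
        intro c' hc'
        injection hc' with hc'
        subst hc'
        intro x hx
        rcases List.mem_append.mp hx with hm | hm
        · exact hcur c rfl x hm
        · simp at hm; subst hm; exact hl

-- congruence for List.any under a pointwise equality on members
theorem pv_any_congr {α : Type} {p q : α → Bool} : ∀ (l : List α),
    (∀ a ∈ l, p a = q a) → l.any p = l.any q := by
  intro l
  induction l with
  | nil => intro _; rfl
  | cons x xs ih =>
    intro h
    simp only [List.any_cons, h x List.mem_cons_self,
      ih (fun a ha => h a (List.mem_cons_of_mem _ ha))]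

-- proof-only abbreviations for the two per-line tests and the hunk test
def pvPA (addr_pat : String) (l : String) : Bool := PySem.Str.isIn addr_pat l
def pvPM (matched_pat : String) (l : String) : Bool :=
  PySem.Str.startswith l "+" && PySem.Str.isIn matched_pat l
def pvQ (addr_pat matched_pat : String) (hunk : List String) : Bool :=
  hunk.any (pvPA addr_pat) && hunk.any (pvPM matched_pat)

-- the simulation: A's split-then-any equals B's streaming loop
theorem pv_sim (addr_pat matched_pat : String)
    (hhdr : ∀ l : String, PySem.Str.startswith l "@@" = true → PySem.Str.startswith l "+" = false) :
    ∀ (lines : List String) (cur : Option (List String)) (acc : List (List String)),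
    (pvA_split lines cur acc).any (pvQ addr_pat matched_pat)
      = (acc.any (pvQ addr_pat matched_pat)
        || pvB_loop addr_pat matched_pat lines cur.isSome
            (cur.elim false (fun c => c.any (pvPA addr_pat)))
            (cur.elim false (fun c => c.any (pvPM matched_pat)))) := by
  intro lines
  induction lines with
  | nil =>
    intro cur acc
    cases cur with
    | none => simp [pvA_split, pvB_loop]
    | some c =>
      simp only [pvA_split, pvB_loop, List.any_append, List.any_cons, List.any_nil,
        Option.isSome_some, Option.elim_some, Bool.true_and, Bool.or_false]
      rfl
  | cons l rest ih =>
    intro cur acc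
    by_cases hh : PySem.Str.startswith l "@@" = true
    · have hp : PySem.Str.startswith l "+" = false := hhdr l hh
      have hql : [l].any (pvPM matched_pat) = false := by
        simp only [List.any_cons, List.any_nil, pvPM, hp, Bool.false_and, Bool.or_false]
      have hal : [l].any (pvPA addr_pat) = pvPA addr_pat l := by simp
      cases cur with
      | none =>
        have e1 : pvA_split (l :: rest) none acc = pvA_split rest (some [l]) acc := by
          simp only [pvA_split]
          rw [if_pos hh]
        have e2 : pvB_loop addr_pat matched_pat (l :: rest) false false false
            = pvB_loop addr_pat matched_pat rest true (pvPA addr_pat l) false := by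
          simp only [pvB_loop]
          rw [if_pos hh]
          simp [pvPA]
        simp only [Option.isSome_none, Option.elim_none]
        rw [e1, ih (some [l]) acc, e2]
        simp only [Option.isSome_some, Option.elim_some, hql, hal]
      | some c =>
        have e1 : pvA_split (l :: rest) (some c) acc = pvA_split rest (some [l]) (acc ++ [c]) := by
          simp only [pvA_split]
          rw [if_pos hh]
        have e2 : pvB_loop addr_pat matched_pat (l :: rest) true (c.any (pvPA addr_pat)) (c.any (pvPM matched_pat))
            = if (c.any (pvPA addr_pat) && c.any (pvPM matched_pat)) = true then true
              else pvB_loop addr_pat matched_pat rest true (pvPA addr_pat l) false := by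
          simp only [pvB_loop]
          rw [if_pos hh]
          simp [pvPA]
        simp only [Option.isSome_some, Option.elim_some]
        rw [e1, ih (some [l]) (acc ++ [c]), e2]
        simp only [List.any_append, List.any_cons, List.any_nil, Option.isSome_some,
          Option.elim_some, Bool.or_false, hql, hal]
        have hqc : pvQ addr_pat matched_pat c = (c.any (pvPA addr_pat) && c.any (pvPM matched_pat)) := rfl
        rw [hqc]
        rcases c.any (pvPA addr_pat) with _ | _ <;> rcases c.any (pvPM matched_pat) with _ | _ <;>
          simp
    · have hh' : PySem.Str.startswith l "@@" = false := Bool.eq_false_iff.mpr hh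
      cases cur with
      | none =>
        have e1 : pvA_split (l :: rest) none acc = pvA_split rest none acc := by
          simp only [pvA_split]
          rw [if_neg hh]
        have e2 : pvB_loop addr_pat matched_pat (l :: rest) false false false
            = pvB_loop addr_pat matched_pat rest false false false := by
          simp only [pvB_loop]
          rw [if_neg hh]
          simp
        simp only [Option.isSome_none, Option.elim_none]
        rw [e1, ih none acc, e2]
        simp only [Option.isSome_none, Option.elim_none]
      | some c =>
        have e1 : pvA_split (l :: rest) (some c) acc = pvA_split rest (some (c ++ [l])) acc := by
          simp only [pvA_split]
          rw [if_neg hh]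
        have e2 : pvB_loop addr_pat matched_pat (l :: rest) true (c.any (pvPA addr_pat)) (c.any (pvPM matched_pat))
            = pvB_loop addr_pat matched_pat rest true
                (c.any (pvPA addr_pat) || pvPA addr_pat l)
                (c.any (pvPM matched_pat) || pvPM matched_pat l) := by
          simp only [pvB_loop]
          rw [if_neg hh]
          simp [pvPA, pvPM]
        simp only [Option.isSome_some, Option.elim_some]
        rw [e1, ih (some (c ++ [l])) acc, e2]
        simp only [List.any_append, List.any_cons, List.any_nil, Option.isSome_some,
          Option.elim_some, Bool.or_false]

-- ===== VERDICT (by name: the statement is the Claim_ definition above) =====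
theorem diff_promotes_address_to_matched_py_spec : Claim_equal_diff_promotes_address_to_matched_py := by
  intro diff address _ hpre
  unfold Spec_diff_promotes_address_to_matched_py
  unfold diff_promotes_address_to_matched_py diff_promotes_address_to_matched_py_alt
  simp only []
  set addr_pat := "\"address\": \"" ++ address ++ "\"" with haddr
  set matched_pat := "\"match_status\": \"matched\"" with hmat
  have hne : addr_pat.toList ≠ [] := by
    rw [haddr]
    simp [String.toList_append]
  have hsub : '\n' ∉ addr_pat.toList := by
    rw [haddr]
    intro hmem
    simp only [String.toList_append, List.mem_append] at hmem
    rcases hmem with (h | h) | h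
    · exact absurd h (by decide)
    · exact hpre h
    · exact absurd h (by decide)
  rw [pv_scan_any]
  have hlines := pv_splitlines_no_newline diff
  have hq : ∀ h ∈ pvA_split (PySem.Str.splitlines diff) none [],
      (PySem.Str.isIn addr_pat (PySem.Str.join "\n" h)
        && h.any (fun l => PySem.Str.startswith l "+" && PySem.Str.isIn matched_pat l))
      = pvQ addr_pat matched_pat h := by
    intro h hh
    have hhl : ∀ l ∈ h, '\n' ∉ l.toList :=
      pv_split_lines (PySem.Str.splitlines diff) none [] hlines
        (by rintro c h'; cases h') (by simp) h hh
    rw [pv_body_test addr_pat h hne hsub hhl]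
    rfl
  rw [pv_any_congr _ hq]
  rw [pv_sim addr_pat matched_pat (fun l => pv_header_not_plus)]
  simp only [List.any_nil, Bool.false_or, Option.isSome_none, Option.elim_none]
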